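-- pv_equiv track=rewrite | github.com/duzc-Repos/PASfinder | bin/4.filter_internal_primed_events.py | mark_internal_primed_event
-- ===== SOURCE A (Python) =====
-- def mark_internal_primed_event(sequence):
--     flag = False
--     if sequence.upper().find('AAAAAA') >= 0:
--         flag = True
--     else:
--         for i in range(len(sequence)-10):
--             if sequence[i:i+10].upper().count('A') >= 7:
--                 flag = True
--                 break
--     return str(flag)
-- ===== SOURCE B (Python) =====
-- def mark_internal_primed_event(sequence):
--     up = sequence.upper()
--     if 'AAAAAA' in up:
--         return 'True'
--     # prefix-sum table: p[j] = number of 'A' in up[:j]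
--     p = [0]
--     for c in up:
--         p.append(p[-1] + (1 if c == 'A' else 0))
--     flag = any(p[i + 10] - p[i] >= 7 for i in range(len(sequence) - 10))
--     return str(flag)
-- ===== Notes on version B (the rewrite author's own statement) =====
-- stated objective: alternative
-- what changed: Replaces the per-index 10-character window rescans (slice, uppercase, count) with a single prefix-sum table of adenine counts over the uppercased sequence, consulted once per window.
import Mathlib
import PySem

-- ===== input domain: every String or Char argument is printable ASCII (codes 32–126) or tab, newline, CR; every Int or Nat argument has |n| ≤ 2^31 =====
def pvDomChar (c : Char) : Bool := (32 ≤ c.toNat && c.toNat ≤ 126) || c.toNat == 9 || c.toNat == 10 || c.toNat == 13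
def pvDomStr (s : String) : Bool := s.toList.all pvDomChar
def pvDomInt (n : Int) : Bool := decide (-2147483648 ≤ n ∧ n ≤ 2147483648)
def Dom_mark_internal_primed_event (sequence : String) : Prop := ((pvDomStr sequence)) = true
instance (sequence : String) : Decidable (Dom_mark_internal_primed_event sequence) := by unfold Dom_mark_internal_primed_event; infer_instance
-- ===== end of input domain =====

-- B replaces A's per-index slice/upper/count window rescans with one prefix-sum table of adenine counts.

-- ===== PORT A =====
-- the for-loop with break: returns true on the first window passing the count test
def pvALoop (cs : List Char) : List Int → Bool
  | [] => false
  | i :: rest =>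
    if 7 ≤ PySem.Chars.count (PySem.Chars.upper (PySem.List.slice cs (some i) (some (i + 10)))) ['A']
    then true
    else pvALoop cs rest

def mark_internal_primed_event (sequence : String) : String :=
  let flag :=
    if 0 ≤ PySem.Str.find (PySem.Str.upper sequence) "AAAAAA" then true
    else pvALoop sequence.toList (PySem.List.pyRange 0 ((PySem.Str.len sequence : Int) - 10) 1)
  if flag then "True" else "False"

-- ===== PORT B =====
-- the for-loop appending p[-1] + (1 if c == 'A' else 0); p is never empty so p[-1] always exists
def pvSums (p : List Int) : List Char → List Int
  | [] => p
  | c :: rest =>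
    pvSums (p ++ [(PySem.List.pyGet? p (-1)).getD 0 + (if c == 'A' then 1 else 0)]) rest

def mark_internal_primed_event_alt (sequence : String) : String :=
  let up := PySem.Str.upper sequence
  if PySem.Str.isIn "AAAAAA" up then "True"
  else
    let p := pvSums [0] up.toList
    -- p[i+10] and p[i]: indices are always in range, so pyGet? … |>.getD 0 is exact
    let flag := (PySem.List.pyRange 0 ((PySem.Str.len sequence : Int) - 10) 1).any
      (fun i => decide (7 ≤ (PySem.List.pyGet? p (i + 10)).getD 0 - (PySem.List.pyGet? p i).getD 0))
    if flag then "True" else "False"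

-- ===== PRECONDITION & SPEC =====
def Spec_mark_internal_primed_event (sequence : String) (out : String) : Prop := out = mark_internal_primed_event_alt sequence
instance (sequence : String) (out : String) : Decidable (Spec_mark_internal_primed_event sequence out) := by unfold Spec_mark_internal_primed_event; infer_instance

-- ===== CLAIM (what is proved, stated in full; the proofs are below) =====
def Claim_equal_mark_internal_primed_event : Prop := ∀ (sequence : String), Dom_mark_internal_primed_event sequence → Spec_mark_internal_primed_event sequence (mark_internal_primed_event sequence)

-- ===== LEMMAS AND PROOFS =====

-- substring count with a single-character needle is List.count
theorem pv_count_go_single (l : List Char) : ∀ (fuel acc : Nat), l.length ≤ fuel →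
    PySem.Chars.count.go ['A'] fuel l acc = acc + l.count 'A' := by
  induction l with
  | nil => intro fuel acc _; cases fuel <;> simp [PySem.Chars.count.go]
  | cons c t ih =>
    intro fuel acc h
    cases fuel with
    | zero => simp at h
    | succ f =>
      simp only [PySem.Chars.count.go]
      by_cases hc : c = 'A'
      · subst hc
        simp only [List.isPrefixOf, beq_self_eq_true, Bool.true_and,
          if_true, List.length_cons, List.length_nil, Nat.zero_add] at *
        rw [List.drop_one, List.tail_cons, ih f (acc + 1) (by omega)]
        simp
        omega
      · have : (['A'].isPrefixOf (c :: t)) = false := by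
          simp [List.isPrefixOf]; exact fun h' => hc h'.symm
        rw [this]
        simp only [Bool.false_eq_true, if_false]
        rw [ih f acc (by simpa using Nat.le_of_succ_le_succ h)]
        simp [hc]

theorem pv_count_single (l : List Char) : PySem.Chars.count l ['A'] = l.count 'A' := by
  simpa using pv_count_go_single l l.length 0 le_rfl

-- the prefix-sum builder, characterised
def pvSumsSpec (a : Int) (up : List Char) : List Int :=
  (List.range up.length).map (fun j => a + ((up.take (j + 1)).count 'A' : Int))

theorem pvSums_eq (up : List Char) : ∀ (p : List Int), p ≠ [] →
    pvSums p up = p ++ pvSumsSpec ((PySem.List.pyGet? p (-1)).getD 0) up := by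
  induction up with
  | nil => intro p _; simp [pvSums, pvSumsSpec]
  | cons c rest ih =>
    intro p hp
    have hlast : (PySem.List.pyGet? (p ++ [(PySem.List.pyGet? p (-1)).getD 0 + (if c == 'A' then 1 else 0)]) (-1)).getD 0
        = (PySem.List.pyGet? p (-1)).getD 0 + (if c == 'A' then 1 else 0) := by
      simp [PySem.List.pyGet?, PySem.List.pyIdx?]
    rw [pvSums, ih _ (by simp), hlast]
    simp only [pvSumsSpec, List.length_cons, List.append_assoc, List.singleton_append]
    congr 1
    rw [List.range_succ_eq_map]
    simp only [List.map_cons, List.map_map]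
    congr 1
    · by_cases hc : c = 'A' <;> simp [hc]
    · apply List.map_congr_left
      intro j _
      by_cases hc : c = 'A' <;>
        simp [Function.comp, List.take_succ_cons, hc]; ring

theorem pv_p_get (up : List Char) (k : Nat) (hk : k ≤ up.length) :
    (PySem.List.pyGet? (pvSums [0] up) ((k : Nat) : Int)).getD 0 = ((up.take k).count 'A' : Int) := by
  rw [pvSums_eq up [0] (by simp)]
  have hp : pvSums [0] up = 0 :: pvSumsSpec 0 up := by
    rw [pvSums_eq up [0] (by simp)]; simp [PySem.List.pyGet?, PySem.List.pyIdx?]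
  rw [show ([0] ++ pvSumsSpec ((PySem.List.pyGet? [0] (-1)).getD 0) up) = 0 :: pvSumsSpec 0 up by
    simp [PySem.List.pyGet?, PySem.List.pyIdx?]]
  rw [PySem.List.pyGet?_natCast]
  cases k with
  | zero => simp
  | succ j =>
    have hlen : j < up.length := by omega
    simp [pvSumsSpec, hlen]

-- the break-loop is an existence check
theorem pvALoop_eq_any (cs : List Char) (l : List Int) :
    pvALoop cs l = l.any (fun i =>
      decide (7 ≤ PySem.Chars.count (PySem.Chars.upper (PySem.List.slice cs (some i) (some (i + 10)))) ['A'])) := by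
  induction l with
  | nil => rfl
  | cons i rest ih =>
    rw [pvALoop, List.any_cons, ih]
    by_cases h : 7 ≤ PySem.Chars.count (PySem.Chars.upper (PySem.List.slice cs (some i) (some (i + 10)))) ['A'] <;>
      simp [h]

theorem pv_any_congr {α : Type} (l : List α) (p q : α → Bool) (h : ∀ x ∈ l, p x = q x) :
    l.any p = l.any q := by
  induction l with
  | nil => rfl
  | cons a t ih =>
    simp only [List.any_cons, h a (by simp), ih (fun x hx => h x (by simp [hx]))]

-- the two window tests agree on every index of the range
theorem pv_window_eq (sequence : String) (i : Int)
    (hi : i ∈ PySem.List.pyRange 0 ((PySem.Str.len sequence : Int) - 10) 1) :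
    (decide (7 ≤ PySem.Chars.count (PySem.Chars.upper
        (PySem.List.slice sequence.toList (some i) (some (i + 10)))) ['A']))
    = (decide (7 ≤ (PySem.List.pyGet? (pvSums [0] (PySem.Str.upper sequence).toList) (i + 10)).getD 0
        - (PySem.List.pyGet? (pvSums [0] (PySem.Str.upper sequence).toList) i).getD 0)) := by
  rw [PySem.List.mem_pyRange_one] at hi
  obtain ⟨h0, hlt⟩ := hi
  set n := sequence.toList.length with hn
  have hlen : PySem.Str.len sequence = n := by simp [hn]
  rw [hlen] at hlt
  obtain ⟨k, rfl⟩ : ∃ k : Nat, i = (k : Int) := ⟨i.toNat, (Int.toNat_of_nonneg h0).symm⟩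
  have hk10 : k + 10 ≤ n := by omega
  have hup : (PySem.Str.upper sequence).toList = sequence.toList.map PySem.Chars.upperChar := by
    simp [PySem.Str.toList_upper, PySem.Chars.upper]
  have hulen : (PySem.Str.upper sequence).toList.length = n := by rw [hup]; simp [hn]
  have hget1 := pv_p_get (PySem.Str.upper sequence).toList (k + 10) (by omega)
  have hget2 := pv_p_get (PySem.Str.upper sequence).toList k (by omega)
  rw [show ((k : Int) + 10) = (((k + 10 : Nat) : Nat) : Int) by push_cast; ring, hget1, hget2]
  rw [PySem.List.slice_natCast, show k + 10 - k = 10 from by omega]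
  rw [pv_count_single]
  have hsplit : (PySem.Str.upper sequence).toList.take (k + 10)
      = (PySem.Str.upper sequence).toList.take k ++ ((PySem.Str.upper sequence).toList.drop k).take 10 := by
    rw [← List.take_add]
  rw [hsplit, List.count_append]
  have hwin : PySem.Chars.upper (List.take 10 (List.drop k sequence.toList))
      = ((PySem.Str.upper sequence).toList.drop k).take 10 := by
    simp [hup, PySem.Chars.upper, List.map_take, List.map_drop]
  rw [hwin]
  simp only [decide_eq_decide]
  push_cast
  omega

-- ===== VERDICT (by name: the statement is the Claim_ definition above) =====
theorem mark_internal_primed_event_spec : Claim_equal_mark_internal_primed_event := by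
  intro sequence _
  show mark_internal_primed_event sequence = mark_internal_primed_event_alt sequence
  unfold mark_internal_primed_event mark_internal_primed_event_alt
  by_cases hfind : 0 ≤ PySem.Str.find (PySem.Str.upper sequence) "AAAAAA"
  · have hin : PySem.Str.isIn "AAAAAA" (PySem.Str.upper sequence) = true := by
      rw [PySem.Str.isIn_iff_infix]
      exact (PySem.Str.find_nonneg_iff _ _).mp hfind
    simp at hfind hin
    simp [hfind, hin]
  · have hin : PySem.Str.isIn "AAAAAA" (PySem.Str.upper sequence) = false := by
      rw [PySem.Str.isIn_eq, PySem.Chars.isIn_eq_false_iff]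
      intro hinf
      exact hfind ((PySem.Str.find_nonneg_iff _ _).mpr hinf)
    simp only [if_neg hfind, hin, Bool.false_eq_true, if_false]
    rw [pvALoop_eq_any]
    rw [pv_any_congr _ _ _ (fun i hi => pv_window_eq sequence i hi)]
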